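-- pv_equiv track=rewrite | github.com/christopher-vollmers/Mandalorion-old | Mandalorion_5_TESS.py | determine_coverage
-- ===== SOURCE A (Python) =====
-- def determine_coverage(coverage_area,chromosome,reverse,peak_center,histo_coverage):
--     coverage=[]
--     coverage.append(0)
--     forward=0
--     reverse1=0
--     forward_missed=0
--     reverse_missed=0
--     coverage_area2=[]
--     coverage_area3=[]
--     for covered_position in set(coverage_area):
--          coverage_area3.append(covered_position)
--          if coverage_area.count(covered_position)>1:
--                coverage_area2.append(covered_position)
--
--
--     coverage_area=sorted(coverage_area2,reverse=reverse)
--     coverage_area1=sorted(coverage_area3,reverse=reverse)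
--     counter=0
--     for base_f in coverage_area1:
--          count=0
--          if reverse==False:
--              if base_f>peak_center:
--                     count=1
--          elif reverse==True:
--              if base_f<peak_center:
--                     count=1
--
--          if count==1:
--              if counter<=4:
--                   counter+=1
--                   base_f=myround(base_f)
--                   try:
--                       bla=histo_coverage[chromosome][base_f]
--                       coverage.append(histo_coverage[chromosome][base_f])
--                   except:
--                       pass
--              else:
--                    break
--     coverage=max(coverage)
--     return coverage, coverage_area
--
-- def myround(x, base=10):
--     return int(round(x,-1))
-- ===== SOURCE B (Python) =====
-- def _bisect(u, x, right):
--     # first index i with u[i] > x (right=True) / u[i] >= x (right=False), u sorted ascending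
--     lo, hi = 0, len(u)
--     while lo < hi:
--         m = (lo + hi) // 2
--         if (u[m] <= x) if right else (u[m] < x):
--             lo = m + 1
--         else:
--             hi = m
--     return lo
--
-- def determine_coverage(coverage_area, chromosome, reverse, peak_center, histo_coverage):
--     s = sorted(coverage_area)
--     uniq = []
--     dups = []
--     i = 0
--     n = len(s)
--     while i < n:
--         j = i + 1
--         while j < n and s[j] == s[i]:
--             j += 1
--         uniq.append(s[i])
--         if j - i > 1:
--             dups.append(s[i])
--         i = j
--     if reverse:
--         lo = _bisect(uniq, peak_center, False)
--         cand = uniq[max(lo - 5, 0):lo][::-1]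
--         dups = dups[::-1]
--     else:
--         lo = _bisect(uniq, peak_center, True)
--         cand = uniq[lo:lo + 5]
--     row = histo_coverage.get(chromosome, {})
--     best = 0
--     for v in cand:
--         w = row.get(myround(v))
--         if w is not None and w > best:
--             best = w
--     return best, dups
--
-- def myround(x, base=10):
--     return int(round(x, -1))
-- ===== Notes on version B (the rewrite author's own statement) =====
-- stated objective: faster
-- what changed: Replaces A's set() plus a full .count scan per distinct value and its counter-and-break selection loop by: one sort of the whole multiset, a single run-length scan that emits the unique and duplicate lists already in order, a hand-written binary search to locate the peak boundary, and a 5-element slice whose rounded lookups are max-folded directly.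
import Mathlib
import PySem

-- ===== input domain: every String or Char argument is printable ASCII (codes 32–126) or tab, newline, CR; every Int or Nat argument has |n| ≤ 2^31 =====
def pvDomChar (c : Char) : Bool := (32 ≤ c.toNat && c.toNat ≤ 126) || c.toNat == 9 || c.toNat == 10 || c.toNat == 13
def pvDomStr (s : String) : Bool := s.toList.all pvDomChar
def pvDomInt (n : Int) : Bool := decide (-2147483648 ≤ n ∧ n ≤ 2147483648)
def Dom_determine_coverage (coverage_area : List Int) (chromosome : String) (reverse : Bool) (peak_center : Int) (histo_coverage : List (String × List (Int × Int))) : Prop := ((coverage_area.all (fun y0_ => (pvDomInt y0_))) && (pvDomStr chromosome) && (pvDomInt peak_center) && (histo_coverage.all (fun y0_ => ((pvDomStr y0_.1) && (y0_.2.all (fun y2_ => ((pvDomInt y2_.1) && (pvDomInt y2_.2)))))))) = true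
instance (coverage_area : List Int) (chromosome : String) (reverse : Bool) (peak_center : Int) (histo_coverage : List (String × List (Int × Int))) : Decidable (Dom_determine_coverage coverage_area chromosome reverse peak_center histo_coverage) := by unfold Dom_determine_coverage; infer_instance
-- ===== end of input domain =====

-- B sorts the whole multiset once, extracts the unique and duplicate lists in one run-length
-- scan (no set() and no per-value .count), finds the peak boundary by binary search and
-- max-folds the rounded lookups of a 5-element slice; objective: faster.

-- ===== PORT A =====

-- myround(x) = int(round(x, -1)) on ints: nearest multiple of 10, ties to even (exact port of
-- Python's banker's rounding on integer arguments).
def myround (x : Int) : Int :=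
  let q := PySem.Int.floordiv x 10
  let r := PySem.Int.mod x 10
  if r < 5 then 10 * q
  else if 5 < r then 10 * (q + 1)
  else if PySem.Int.mod q 2 = 0 then 10 * q else 10 * (q + 1)

-- body of A's first loop: appends to coverage_area3 and, when count>1, to coverage_area2
def detA_collect (coverage_area : List Int) (acc : List Int × List Int) (cp : Int) : List Int × List Int :=
  (acc.1 ++ [cp], if coverage_area.count cp > 1 then acc.2 ++ [cp] else acc.2)

-- body of A's second loop; state = (counter, coverage, broken)
def detA_step (chromosome : String) (reverse : Bool) (peak_center : Int)
    (histo_coverage : List (String × List (Int × Int)))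
    (st : Int × List Int × Bool) (base_f : Int) : Int × List Int × Bool :=
  if st.2.2 then st
  else
    let count : Int := if reverse = false then (if base_f > peak_center then 1 else 0)
      else (if base_f < peak_center then 1 else 0)
    if count = 1 then
      if st.1 ≤ 4 then
        match PySem.Dict.get? (PySem.Dict.mk histo_coverage) chromosome with
        | none => (st.1 + 1, st.2.1, st.2.2)
        | some inner =>
          match PySem.Dict.get? (PySem.Dict.mk inner) (myround base_f) with
          | none => (st.1 + 1, st.2.1, st.2.2)
          | some v => (st.1 + 1, st.2.1 ++ [v], st.2.2)
      else (st.1, st.2.1, true)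
    else st

def determine_coverage (coverage_area : List Int) (chromosome : String) (reverse : Bool) (peak_center : Int) (histo_coverage : List (String × List (Int × Int))) : Int × List Int :=
  let coverage : List Int := [0]
  let p := (PySem.Set.ofList coverage_area).foldl (detA_collect coverage_area) ([], [])
  let coverage_area' := PySem.List.sorted p.2 (fun x => x) reverse
  let coverage_area1 := PySem.List.sorted p.1 (fun x => x) reverse
  let st := coverage_area1.foldl (detA_step chromosome reverse peak_center histo_coverage)
      (0, coverage, false)
  ((PySem.List.max? st.2.1 (fun x => x)).getD 0, coverage_area')

-- ===== PORT B =====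

-- the inner 'while j<n and s[j]==s[i]' loop: (length of the leading run of x, remainder)
def splitRun (x : Int) : List Int → Nat × List Int
  | [] => (0, [])
  | y :: t => if y = x then ((splitRun x t).1 + 1, (splitRun x t).2) else (0, y :: t)

-- termination measure for runScan (cited by its decreasing_by)
lemma splitRun_snd_length_le (x : Int) (t : List Int) : (splitRun x t).2.length ≤ t.length := by
  induction t with
  | nil => simp [splitRun]
  | cons y t ih =>
      by_cases h : y = x
      · simp only [splitRun, if_pos h, List.length_cons]; omega
      · simp [splitRun, h]

-- the outer 'while i<n' loop of Source B: one pass over the sorted multiset producing (uniq, dups)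
def runScan : List Int → List Int × List Int
  | [] => ([], [])
  | x :: t =>
      let q := runScan (splitRun x t).2
      (x :: q.1, if (splitRun x t).1 ≥ 1 then x :: q.2 else q.2)
termination_by l => l.length
decreasing_by simpa using Nat.lt_succ_of_le (splitRun_snd_length_le x t)

-- the branch test of _bisect
def bcond (u : List Int) (x : Int) (right : Bool) (i : Nat) : Bool :=
  if right then decide (u.getD i 0 ≤ x) else decide (u.getD i 0 < x)

-- _bisect's while loop (indices are nonnegative Python ints; u[m] is always in range, ported
-- as getD; (lo+hi)//2 on nonnegative ints is Nat division)
def bis (u : List Int) (x : Int) (right : Bool) (lo hi : Nat) : Nat :=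
  if _h : lo < hi then
    if bcond u x right ((lo + hi) / 2)
    then bis u x right ((lo + hi) / 2 + 1) hi
    else bis u x right lo ((lo + hi) / 2)
  else lo
termination_by hi - lo
decreasing_by all_goals omega

-- slices on nonneg in-range indices: uniq[lo:lo+5] = (drop lo).take 5 and
-- uniq[max(lo-5,0):lo] = (take lo).drop (lo-5) (Nat subtraction = the max with 0)
def determine_coverage_alt (coverage_area : List Int) (chromosome : String) (reverse : Bool) (peak_center : Int) (histo_coverage : List (String × List (Int × Int))) : Int × List Int :=
  let s := PySem.List.sorted coverage_area (fun x => x) false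
  let ud := runScan s
  let uniq := ud.1
  let cand : List Int :=
    if reverse then
      let lo := bis uniq peak_center false 0 uniq.length
      ((uniq.take lo).drop (lo - 5)).reverse
    else
      let lo := bis uniq peak_center true 0 uniq.length
      (uniq.drop lo).take 5
  let dups := if reverse then ud.2.reverse else ud.2
  let row := (PySem.Dict.get? (PySem.Dict.mk histo_coverage) chromosome).getD []
  let best := cand.foldl (fun best v =>
      match PySem.Dict.get? (PySem.Dict.mk row) (myround v) with
      | none => best
      | some w => if best < w then w else best) 0
  (best, dups)

-- ===== PRECONDITION & SPEC =====
def Spec_determine_coverage (coverage_area : List Int) (chromosome : String) (reverse : Bool) (peak_center : Int) (histo_coverage : List (String × List (Int × Int))) (out : Int × List Int) : Prop := out = determine_coverage_alt coverage_area chromosome reverse peak_center histo_coverage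
instance (coverage_area : List Int) (chromosome : String) (reverse : Bool) (peak_center : Int) (histo_coverage : List (String × List (Int × Int))) (out : Int × List Int) : Decidable (Spec_determine_coverage coverage_area chromosome reverse peak_center histo_coverage out) := by unfold Spec_determine_coverage; infer_instance

-- ===== CLAIM (what is proved, stated in full; the proofs are below) =====
def Claim_equal_determine_coverage : Prop := ∀ (coverage_area : List Int) (chromosome : String) (reverse : Bool) (peak_center : Int) (histo_coverage : List (String × List (Int × Int))), Dom_determine_coverage coverage_area chromosome reverse peak_center histo_coverage → Spec_determine_coverage coverage_area chromosome reverse peak_center histo_coverage (determine_coverage coverage_area chromosome reverse peak_center histo_coverage)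

-- ===== LEMMAS AND PROOFS =====

-- A's first loop over set(coverage_area) produces the set itself and its dup-filtered part
lemma detA_collect_fold (ca : List Int) :
    ∀ (l a b : List Int),
      l.foldl (detA_collect ca) (a, b) = (a ++ l, b ++ l.filter (fun cp => ca.count cp > 1)) := by
  intro l
  induction l with
  | nil => intro a b; simp
  | cons x t ih =>
      intro a b
      simp only [List.foldl_cons, detA_collect, List.filter_cons]
      by_cases h : ca.count x > 1 <;> simp [h, ih]

-- splitRun on a sorted tail: the run is a replicate prefix and the remainder is strictly larger
lemma splitRun_spec (x : Int) :
    ∀ t : List Int, (x :: t).Pairwise (· ≤ ·) →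
      t = List.replicate (splitRun x t).1 x ++ (splitRun x t).2 ∧
        ∀ y ∈ (splitRun x t).2, x < y := by
  intro t
  induction t with
  | nil => intro _; simp [splitRun]
  | cons y t ih =>
      intro hp
      by_cases h : y = x
      · subst h
        have hp' : (y :: t).Pairwise (· ≤ ·) := hp.of_cons
        obtain ⟨h1, h2⟩ := ih hp'
        refine ⟨?_, by simpa only [splitRun, if_pos rfl] using h2⟩
        simp only [splitRun]
        exact congrArg (y :: ·) h1
      · have hxy : x ≤ y := (List.pairwise_cons.mp hp).1 y (by simp)
        have hxylt : x < y := lt_of_le_of_ne hxy (fun e => h e.symm)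
        refine ⟨by simp [splitRun, h], ?_⟩
        simp only [splitRun, if_neg h]
        intro z hz
        rcases List.mem_cons.mp hz with rfl | hz'
        · exact hxylt
        · have hyz : y ≤ z := (List.pairwise_cons.mp hp.of_cons).1 z hz'
          exact lt_of_lt_of_le hxylt hyz

-- one run-length pass over a sorted list yields the strictly increasing distincts and duplicates
lemma runScan_spec :
    ∀ l : List Int, l.Pairwise (· ≤ ·) →
      ((runScan l).1.Pairwise (· < ·) ∧ (∀ x, x ∈ (runScan l).1 ↔ x ∈ l)) ∧
      ((runScan l).2.Pairwise (· < ·) ∧ (∀ x, x ∈ (runScan l).2 ↔ 2 ≤ l.count x)) := by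
  intro l
  induction l using runScan.induct with
  | case1 => simp [runScan]
  | case2 x t ih =>
      intro hp
      obtain ⟨ht, hgt⟩ := splitRun_spec x t hp
      have hsub : (splitRun x t).2.Sublist t := by
        conv_rhs => rw [ht]
        exact List.sublist_append_right _ _
      have hpr : (splitRun x t).2.Pairwise (· ≤ ·) := hp.of_cons.sublist hsub
      obtain ⟨⟨hu1, hu2⟩, ⟨hd1, hd2⟩⟩ := ih hpr
      have hxnotr : x ∉ (splitRun x t).2 := fun hx => lt_irrefl x (hgt x hx)
      have hcnt : ∀ z, (x :: t).count z
          = (if z = x then (splitRun x t).1 + 1 else 0) + (splitRun x t).2.count z := by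
        intro z
        rw [List.count_cons]
        conv_lhs => rw [ht]
        rw [List.count_append, List.count_replicate]
        rcases eq_or_ne z x with rfl | hz
        · simp; omega
        · have hz2 : x ≠ z := fun h => hz h.symm
          simp [hz, hz2]
      have hdr : ∀ z ∈ (runScan (splitRun x t).2).2, z ∈ (splitRun x t).2 := by
        intro z hz
        have := (hd2 z).mp hz
        exact List.count_pos_iff.mp (by omega)
      simp only [runScan]
      refine ⟨⟨?_, ?_⟩, ?_, ?_⟩
      · exact List.pairwise_cons.mpr ⟨fun z hz => hgt z ((hu2 z).mp hz), hu1⟩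
      · intro z
        simp only [List.mem_cons, hu2]
        constructor
        · rintro (rfl | hz)
          · exact Or.inl rfl
          · exact Or.inr (hsub.subset hz)
        · rintro (rfl | hz)
          · exact Or.inl rfl
          · rw [ht] at hz
            rcases List.mem_append.mp hz with hz' | hz'
            · exact Or.inl (List.eq_of_mem_replicate hz')
            · exact Or.inr hz'
      · by_cases hk : (splitRun x t).1 ≥ 1
        · simp only [if_pos hk]
          exact List.pairwise_cons.mpr ⟨fun z hz => hgt z (hdr z hz), hd1⟩
        · simpa only [if_neg hk] using hd1
      · intro z
        have hiff : z ∈ (if (splitRun x t).1 ≥ 1 then x :: (runScan (splitRun x t).2).2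
            else (runScan (splitRun x t).2).2) ↔ (z = x ∧ 1 ≤ (splitRun x t).1) ∨
              2 ≤ (splitRun x t).2.count z := by
          by_cases hk : (splitRun x t).1 ≥ 1
          · simp only [if_pos hk, List.mem_cons, hd2]
            constructor
            · rintro (rfl | h)
              · exact Or.inl ⟨rfl, hk⟩
              · exact Or.inr h
            · rintro (⟨rfl, _⟩ | h)
              · exact Or.inl rfl
              · exact Or.inr h
          · simp only [if_neg hk, hd2]
            refine ⟨fun h => Or.inr h, fun h => ?_⟩
            rcases h with ⟨_, h1⟩ | h
            · exact absurd h1 hk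
            · exact h
        rw [hiff, hcnt z]
        rcases eq_or_ne z x with rfl | hzx
        · have hzr : (splitRun z t).2.count z = 0 := List.count_eq_zero.mpr hxnotr
          rw [if_pos rfl, hzr]
          omega
        · rw [if_neg hzx]
          constructor
          · rintro (⟨rfl, _⟩ | h)
            · exact absurd rfl hzx
            · omega
          · intro h
            exact Or.inr (by omega)

-- binary-search invariant: bis keeps the true-region left of lo and the false-region right of hi
lemma bis_inv (u : List Int) (x : Int) (right : Bool) :
    ∀ (n lo hi : Nat), hi - lo ≤ n → lo ≤ hi → hi ≤ u.length →
      (lo = 0 ∨ bcond u x right (lo - 1) = true) →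
      (hi = u.length ∨ bcond u x right hi = false) →
      lo ≤ bis u x right lo hi ∧ bis u x right lo hi ≤ hi ∧
      (bis u x right lo hi = 0 ∨ bcond u x right (bis u x right lo hi - 1) = true) ∧
      (bis u x right lo hi = u.length ∨ bcond u x right (bis u x right lo hi) = false) := by
  intro n
  induction n with
  | zero =>
      intro lo hi h0 h1 h2 h3 h4
      have hlh : lo = hi := by omega
      subst hlh
      unfold bis
      rw [dif_neg (by omega)]
      exact ⟨le_refl _, le_refl _, h3, h4⟩
  | succ n ih =>
      intro lo hi h0 h1 h2 h3 h4
      by_cases hlt : lo < hi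
      · unfold bis
        rw [dif_pos hlt]
        cases hc : bcond u x right ((lo + hi) / 2) with
        | true =>
            rw [if_pos rfl]
            have := ih ((lo + hi) / 2 + 1) hi (by omega) (by omega) h2
              (Or.inr (by simpa using hc)) h4
            exact ⟨by omega, this.2.1, this.2.2.1, this.2.2.2⟩
        | false =>
            rw [if_neg (by simp)]
            have := ih lo ((lo + hi) / 2) (by omega) (by omega) (by omega) h3 (Or.inr hc)
            exact ⟨this.1, by omega, this.2.2.1, this.2.2.2⟩
      · unfold bis
        rw [dif_neg hlt]
        have hlh : lo = hi := by omega
        exact ⟨le_refl _, h1, h3, by rw [hlh]; exact h4⟩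

-- with a monotone condition the boundary splits u exactly
lemma bis_char (u : List Int) (x : Int) (right : Bool)
    (mono : ∀ i j, i ≤ j → j < u.length → bcond u x right j = true → bcond u x right i = true) :
    bis u x right 0 u.length ≤ u.length ∧
    (∀ i, i < bis u x right 0 u.length → bcond u x right i = true) ∧
    (∀ i, bis u x right 0 u.length ≤ i → i < u.length → bcond u x right i = false) := by
  obtain ⟨hle0, hle, hP1, hP2⟩ := bis_inv u x right u.length 0 u.length
    (by omega) (by omega) (le_refl _) (Or.inl rfl) (Or.inl rfl)
  refine ⟨hle, ?_, ?_⟩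
  · intro i hi
    rcases hP1 with h0 | hP1
    · omega
    · exact mono i (bis u x right 0 u.length - 1) (by omega) (by omega) hP1
  · intro i hri hilen
    cases hci : bcond u x right i with
    | false => rfl
    | true =>
        rcases hP2 with hlen | hP2
        · omega
        · have := mono (bis u x right 0 u.length) i hri hilen hci
          rw [hP2] at this
          exact absurd this (by simp)

-- a pointwise-false prefix and pointwise-true suffix make filter a drop
lemma filter_eq_drop (u : List Int) (p : Int → Bool) (r : Nat) (hr : r ≤ u.length)
    (h1 : ∀ (i : Nat) (h : i < r), p (u[i]'(by omega)) = false)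
    (h2 : ∀ (i : Nat) (h : i < u.length), r ≤ i → p u[i] = true) :
    u.filter p = u.drop r := by
  conv_lhs => rw [← List.take_append_drop r u]
  rw [List.filter_append]
  have hnil : (u.take r).filter p = [] := by
    rw [List.filter_eq_nil_iff]
    intro a ha
    obtain ⟨i, hi, hgi⟩ := List.getElem_of_mem ha
    have hir : i < r := by
      have := List.length_take_le r u
      have h' : i < min r u.length := by simpa [List.length_take] using hi
      omega
    rw [List.getElem_take] at hgi
    rw [← hgi]
    simp [h1 i hir]
  have hself : (u.drop r).filter p = u.drop r := by
    rw [List.filter_eq_self]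
    intro a ha
    obtain ⟨i, hi, hgi⟩ := List.getElem_of_mem ha
    have hlen : r + i < u.length := by
      have h' : i < u.length - r := by simpa [List.length_drop] using hi
      omega
    rw [List.getElem_drop] at hgi
    rw [← hgi]
    exact h2 (r + i) hlen (by omega)
  rw [hnil, hself, List.nil_append]

-- a pointwise-true prefix and pointwise-false suffix make filter a take
lemma filter_eq_take (u : List Int) (p : Int → Bool) (r : Nat) (hr : r ≤ u.length)
    (h1 : ∀ (i : Nat) (h : i < r), p (u[i]'(by omega)) = true)
    (h2 : ∀ (i : Nat) (h : i < u.length), r ≤ i → p u[i] = false) :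
    u.filter p = u.take r := by
  conv_lhs => rw [← List.take_append_drop r u]
  rw [List.filter_append]
  have hself : (u.take r).filter p = u.take r := by
    rw [List.filter_eq_self]
    intro a ha
    obtain ⟨i, hi, hgi⟩ := List.getElem_of_mem ha
    have hir : i < r := by
      have h' : i < min r u.length := by simpa [List.length_take] using hi
      omega
    rw [List.getElem_take] at hgi
    rw [← hgi]
    exact h1 i hir
  have hnil : (u.drop r).filter p = [] := by
    rw [List.filter_eq_nil_iff]
    intro a ha
    obtain ⟨i, hi, hgi⟩ := List.getElem_of_mem ha
    have hlen : r + i < u.length := by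
      have h' : i < u.length - r := by simpa [List.length_drop] using hi
      omega
    rw [List.getElem_drop] at hgi
    rw [← hgi]
    simp [h2 (r + i) hlen (by omega)]
  rw [hnil, hself, List.append_nil]

-- the lookup result a candidate contributes (A: try/except append; B: .get)
def detSucc (chromosome : String) (histo_coverage : List (String × List (Int × Int))) (v : Int) : List Int :=
  match PySem.Dict.get? (PySem.Dict.mk histo_coverage) chromosome with
  | none => []
  | some inner =>
    match PySem.Dict.get? (PySem.Dict.mk inner) (myround v) with
    | none => []
    | some w => [w]

-- the side test of A's second loop, as a Bool
def detP (reverse : Bool) (peak_center : Int) (v : Int) : Bool :=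
  if reverse then decide (v < peak_center) else decide (v > peak_center)

-- once broken, A's loop does nothing
lemma detA_fold_broken (chromosome : String) (reverse : Bool) (peak_center : Int)
    (histo_coverage : List (String × List (Int × Int))) (l : List Int) (c : Int) (cov : List Int) :
    l.foldl (detA_step chromosome reverse peak_center histo_coverage) (c, cov, true) = (c, cov, true) := by
  induction l with
  | nil => rfl
  | cons v t ih => simpa [detA_step] using ih

-- A's count flag is the side test
lemma detA_count_eq_one_iff (reverse : Bool) (peak_center v : Int) :
    ((if reverse = false then (if v > peak_center then (1:Int) else 0)
      else (if v < peak_center then 1 else 0)) = 1) ↔ detP reverse peak_center v = true := by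
  cases reverse <;> by_cases h : v < peak_center <;> by_cases h' : v > peak_center <;>
    simp [detP, h, h']

-- A's counter-and-break loop appends exactly the lookups of the first (5-c) on-side values
lemma detA_fold_char (chromosome : String) (reverse : Bool) (peak_center : Int)
    (histo_coverage : List (String × List (Int × Int))) :
    ∀ (l : List Int) (c : Int) (cov : List Int), 0 ≤ c → c ≤ 5 →
      (l.foldl (detA_step chromosome reverse peak_center histo_coverage) (c, cov, false)).2.1
        = cov ++ ((l.filter (detP reverse peak_center)).take (5 - c.toNat)).flatMap
            (detSucc chromosome histo_coverage) := by
  intro l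
  induction l with
  | nil => intro c cov _ _; simp
  | cons v t ih =>
      intro c cov hc0 hc5
      rw [List.foldl_cons, List.filter_cons]
      by_cases hp : detP reverse peak_center v = true
      · rw [if_pos hp]
        by_cases hc4 : c ≤ 4
        · have hstep : detA_step chromosome reverse peak_center histo_coverage (c, cov, false) v
              = (c + 1, cov ++ detSucc chromosome histo_coverage v, false) := by
            unfold detA_step detSucc
            rw [if_neg (by simp), if_pos ((detA_count_eq_one_iff reverse peak_center v).mpr hp),
              if_pos hc4]
            cases hg : PySem.Dict.get? (PySem.Dict.mk histo_coverage) chromosome with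
            | none => simp
            | some inner =>
                cases hg2 : PySem.Dict.get? (PySem.Dict.mk inner) (myround v) with
                | none => simp [hg2]
                | some w => simp [hg2]
          rw [hstep, ih (c + 1) _ (by omega) (by omega)]
          have htake : 5 - c.toNat = (5 - (c + 1).toNat) + 1 := by omega
          rw [htake, List.take_succ_cons, List.flatMap_cons, List.append_assoc]
        · have hc5' : c = 5 := by omega
          have hstep : detA_step chromosome reverse peak_center histo_coverage (c, cov, false) v
              = (c, cov, true) := by
            unfold detA_step
            rw [if_neg (by simp), if_pos ((detA_count_eq_one_iff reverse peak_center v).mpr hp),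
              if_neg hc4]
          rw [hstep, detA_fold_broken]
          simp [hc5']
      · rw [if_neg hp]
        have hstep : detA_step chromosome reverse peak_center histo_coverage (c, cov, false) v
            = (c, cov, false) := by
          unfold detA_step
          rw [if_neg (by simp), if_neg (fun h => hp ((detA_count_eq_one_iff reverse peak_center v).mp h))]
        rw [hstep, ih c cov hc0 hc5]

-- B's running max over candidates is the max-fold of their lookups
lemma detB_fold_char (chromosome : String) (histo_coverage : List (String × List (Int × Int))) :
    ∀ (cand : List Int) (b : Int),
      cand.foldl (fun best v =>
        match PySem.Dict.get? (PySem.Dict.mk ((PySem.Dict.get? (PySem.Dict.mk histo_coverage) chromosome).getD [])) (myround v) with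
        | none => best
        | some w => if best < w then w else best) b
      = (cand.flatMap (detSucc chromosome histo_coverage)).foldl max b := by
  intro cand
  induction cand with
  | nil => intro b; rfl
  | cons v t ih =>
      intro b
      rw [List.foldl_cons, List.flatMap_cons, List.foldl_append, ih]
      congr 1
      unfold detSucc
      cases hg : PySem.Dict.get? (PySem.Dict.mk histo_coverage) chromosome with
      | none =>
          simp only [Option.getD_none]
          have : PySem.Dict.get? (PySem.Dict.mk ([] : List (Int × Int))) (myround v) = none := rfl
          rw [this]
          rfl
      | some inner =>
          simp only [Option.getD_some]
          cases hg2 : PySem.Dict.get? (PySem.Dict.mk inner) (myround v) with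
          | none => rfl
          | some w =>
              simp only [List.foldl_cons, List.foldl_nil]
              rcases lt_or_ge b w with h | h
              · rw [if_pos h, max_eq_right h.le]
              · rw [if_neg (not_lt.mpr h), max_eq_left h]

-- the two programs agree on every input
lemma determine_coverage_eq (ca : List Int) (chrom : String) (rev : Bool) (pc : Int)
    (histo : List (String × List (Int × Int))) :
    determine_coverage ca chrom rev pc histo = determine_coverage_alt ca chrom rev pc histo := by
  unfold determine_coverage determine_coverage_alt
  simp only [detA_collect_fold, List.nil_append]
  have hSLp : (PySem.List.sorted ca (fun x => x) false).Pairwise (· ≤ ·) :=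
    PySem.List.sorted_pairwise ca (fun x => x)
  have hperm : (PySem.List.sorted ca (fun x => x) false).Perm ca :=
    PySem.List.sorted_perm ca (fun x => x) false
  obtain ⟨⟨hu1, hu2⟩, ⟨hd1, hd2⟩⟩ := runScan_spec (PySem.List.sorted ca (fun x => x) false) hSLp
  set SL := PySem.List.sorted ca (fun x => x) false with hSLdef
  set u := (runScan SL).1 with hudef
  set d := (runScan SL).2 with hddef
  -- the unique list is sorted(set(ca)) and the dup list is the sorted duplicates
  have hu_nd : u.Nodup := hu1.imp ne_of_lt
  have hu_mem : ∀ z, z ∈ u ↔ z ∈ ca := fun z => (hu2 z).trans hperm.mem_iff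
  have hu_perm : u.Perm (PySem.Set.ofList ca) :=
    (List.perm_ext_iff_of_nodup hu_nd (PySem.Set.nodup_ofList ca)).mpr
      (fun z => (hu_mem z).trans (PySem.Set.mem_ofList ca z).symm)
  have e1 : PySem.List.sorted (PySem.Set.ofList ca) (fun x => x) false = u :=
    PySem.List.sorted_eq_of_perm_of_pairwise_lt _ _ _ hu_perm hu1
  have hd_nd : d.Nodup := hd1.imp ne_of_lt
  have hd_mem : ∀ z, z ∈ d ↔ z ∈ (PySem.Set.ofList ca).filter (fun cp => ca.count cp > 1) := by
    intro z
    rw [hd2 z, List.mem_filter, PySem.Set.mem_ofList]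
    constructor
    · intro h
      have hcnt : 2 ≤ ca.count z := by rw [← hperm.count_eq]; exact h
      exact ⟨List.count_pos_iff.mp (by omega), by simpa using (by omega : 1 < ca.count z)⟩
    · rintro ⟨_, h⟩
      have : 1 < ca.count z := by simpa using h
      rw [hperm.count_eq]
      omega
  have hd_perm : d.Perm ((PySem.Set.ofList ca).filter (fun cp => ca.count cp > 1)) :=
    (List.perm_ext_iff_of_nodup hd_nd ((PySem.Set.nodup_ofList ca).filter _)).mpr hd_mem
  have e2 : PySem.List.sorted ((PySem.Set.ofList ca).filter (fun cp => ca.count cp > 1))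
      (fun x => x) false = d :=
    PySem.List.sorted_eq_of_perm_of_pairwise_lt _ _ _ hd_perm hd1
  have e2r : PySem.List.sorted ((PySem.Set.ofList ca).filter (fun cp => ca.count cp > 1))
      (fun x => x) true = d.reverse :=
    PySem.List.sorted_rev_eq_of_perm_of_pairwise_gt _ _ _ (d.reverse_perm.trans hd_perm)
      (List.pairwise_reverse.mpr hd1)
  have e1r : PySem.List.sorted (PySem.Set.ofList ca) (fun x => x) true = u.reverse :=
    PySem.List.sorted_rev_eq_of_perm_of_pairwise_gt _ _ _ (u.reverse_perm.trans hu_perm)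
      (List.pairwise_reverse.mpr hu1)
  -- monotone step along u
  have hstepmono : ∀ i j : Nat, i ≤ j → (hj : j < u.length) → u.getD i 0 ≤ u.getD j 0 := by
    intro i j hij hj
    rcases eq_or_lt_of_le hij with rfl | hlt
    · exact le_refl _
    · have hi : i < u.length := lt_trans hlt hj
      rw [List.getD_eq_getElem u 0 hi, List.getD_eq_getElem u 0 hj]
      exact le_of_lt (List.pairwise_iff_getElem.mp hu1 i j hi hj hlt)
  cases rev with
  | false =>
      have hmono : ∀ i j, i ≤ j → j < u.length → bcond u pc true j = true → bcond u pc true i = true := by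
        intro i j hij hj hcj
        have h2 := hstepmono i j hij hj
        unfold bcond at hcj ⊢
        rw [if_pos rfl, decide_eq_true_eq] at hcj
        rw [if_pos rfl, decide_eq_true_eq]
        omega
      obtain ⟨hrle, htrue, hfalse⟩ := bis_char u pc true hmono
      set r := bis u pc true 0 u.length with hrdef
      have hPdet : detP false pc = fun v => decide (v > pc) := by
        funext v; simp [detP]
      have hfd : u.filter (fun v => decide (v > pc)) = u.drop r := by
        apply filter_eq_drop u _ r hrle
        · intro i hir
          have hi : i < u.length := by omega
          have h := htrue i hir
          unfold bcond at h
          rw [if_pos rfl, decide_eq_true_eq, List.getD_eq_getElem u 0 hi] at h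
          simp only [gt_iff_lt, decide_eq_false_iff_not, not_lt]
          exact h
        · intro i hi hri
          have h := hfalse i hri hi
          unfold bcond at h
          rw [if_pos rfl, List.getD_eq_getElem u 0 hi, decide_eq_false_iff_not] at h
          rw [decide_eq_true_eq]
          omega
      rw [e1, e2]
      rw [detA_fold_char chrom false pc histo u 0 [0] (by omega) (by omega)]
      rw [List.cons_append, List.nil_append, PySem.List.max?_id_cons, Option.getD_some]
      rw [detB_fold_char chrom histo]
      rw [hPdet, hfd]
      norm_num
  | true =>
      have hmono : ∀ i j, i ≤ j → j < u.length → bcond u pc false j = true → bcond u pc false i = true := by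
        intro i j hij hj hcj
        have h2 := hstepmono i j hij hj
        unfold bcond at hcj ⊢
        rw [if_neg (by simp), decide_eq_true_eq] at hcj
        rw [if_neg (by simp), decide_eq_true_eq]
        omega
      obtain ⟨hrle, htrue, hfalse⟩ := bis_char u pc false hmono
      set r := bis u pc false 0 u.length with hrdef
      have hPdet : detP true pc = fun v => decide (v < pc) := by
        funext v; simp [detP]
      have hft : u.filter (fun v => decide (v < pc)) = u.take r := by
        apply filter_eq_take u _ r hrle
        · intro i hir
          have hi : i < u.length := by omega
          have h := htrue i hir
          unfold bcond at h
          rw [if_neg (by simp), decide_eq_true_eq, List.getD_eq_getElem u 0 hi] at h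
          rw [decide_eq_true_eq]
          exact h
        · intro i hi hri
          have h := hfalse i hri hi
          unfold bcond at h
          rw [if_neg (by simp), List.getD_eq_getElem u 0 hi, decide_eq_false_iff_not] at h
          rw [decide_eq_false_iff_not]
          exact h
      rw [e1r, e2r]
      rw [detA_fold_char chrom true pc histo u.reverse 0 [0] (by omega) (by omega)]
      rw [List.cons_append, List.nil_append, PySem.List.max?_id_cons, Option.getD_some]
      rw [detB_fold_char chrom histo]
      rw [hPdet, List.filter_reverse, hft, List.take_reverse]
      have hlen : (u.take r).length = r := by
        rw [List.length_take]
        omega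
      rw [hlen]
      norm_num

-- ===== VERDICT (by name: the statement is the Claim_ definition above) =====
theorem determine_coverage_spec : Claim_equal_determine_coverage := by
  intro coverage_area chromosome reverse peak_center histo_coverage _
  unfold Spec_determine_coverage
  exact determine_coverage_eq coverage_area chromosome reverse peak_center histo_coverage
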